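-- pv_equiv track=rewrite | github.com/zackj/advent-of-code-2023 | 2025/2/solution.py | considerable_ranges
-- ===== SOURCE A (Python) =====
-- def number_of_digits(n) -> int:
--     e = 1
--     while (n % (10**e) != n):
--         e += 1
--     return e
--
-- def considerable_ranges(in_range) -> list:
--     (n, stop) = in_range
--     # n is the current number we're examining
--
--     # storage for all the sub ranges we'll be inspecting
--     ranges = []
--
--     while (n < stop):
--         # count the digits of n
--         e = number_of_digits(n)
--
--         # If n has an even number of digits, we're cool
--         # otherwise, skip everything from n to the next
--         # number with an even number of digits
--         if e % 2 != 0: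
--             n = 10**e
--             e += 1
--
--         assert e % 2 == 0
--
--         # If n > stop then we're done.
--         # IE: range is 123-555
--         # n starts at 123, which has 3 digits so e = 3
--         # but since e is odd, we set n = 10**e = 10**3 = 1000
--         # but 1000 > 555, so we don't need to inspect this range
--         # at all
--         if n > stop:
--             continue
--
--         # Determine where to stop.
--         # IE: range is 123, 100005
--         # n starts at 123, which has 3 digits so e = 3
--         # but since e is odd, we set n = 10**e = 10**3 = 1000
--         # But n < 100005, so we need to inspect all the values from 1000 to 100005
--         # but that's actually only the ranges:
--         # 1000 - 10000
--         # 100000 - 100005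
--         # but, 10000 to 10005 all have odd number of digits
--         # so we don't need to inspect those at all.
--         # In this example,
--         # stop_e = 6
--         stop_e = number_of_digits(stop)
--
--         while (e <= stop_e):
--             # set the range
--             if e == stop_e:
--                 ranges.append((n, stop+1))
--             else:
--                 ranges.append((n, min(stop, 10**e)))
--
--             e += 1
--             n = 10**e
--             e += 1
--
--     return ranges
-- ===== SOURCE B (Python) =====
-- def num_digits(n) -> int:
--     return 1 if n < 10 else 1 + num_digits(n // 10)
--
-- def considerable_ranges(in_range) -> list:
--     (n, stop) = in_range
--     if n >= stop:
--         return []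
--     stop_d = num_digits(stop)
--     return [
--         (max(n, 10 ** (d - 1)), stop + 1 if d == stop_d else 10 ** d)
--         for d in range(num_digits(n), stop_d + 1)
--         if d % 2 == 0
--     ]
-- ===== Notes on version B (the rewrite author's own statement) =====
-- stated objective: simpler
-- what changed: Replaces A's two nested stateful while-loops (outer scan re-entering and re-deriving digit counts, inner loop stepping the exponent by two and threading a mutable lower bound n) by a single stateless list comprehension over all digit lengths d in range(num_digits(n), num_digits(stop)+1) filtered to even d, with the closed-form bounds (max(n, 10**(d-1)), stop+1 if d==stop_d else 10**d); the digit count itself is computed by recursive division by 10 instead of A's modulus-comparison loop.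
import Mathlib
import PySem

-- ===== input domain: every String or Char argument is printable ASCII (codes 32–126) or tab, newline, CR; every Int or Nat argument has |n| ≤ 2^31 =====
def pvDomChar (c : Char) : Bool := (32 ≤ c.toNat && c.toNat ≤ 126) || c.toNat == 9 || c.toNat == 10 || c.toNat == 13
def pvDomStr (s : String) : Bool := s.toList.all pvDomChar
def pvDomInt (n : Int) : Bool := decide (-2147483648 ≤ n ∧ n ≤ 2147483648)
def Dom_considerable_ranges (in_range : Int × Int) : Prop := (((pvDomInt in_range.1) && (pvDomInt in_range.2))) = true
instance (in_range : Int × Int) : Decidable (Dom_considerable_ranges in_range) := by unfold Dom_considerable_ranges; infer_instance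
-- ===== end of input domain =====

-- B replaces A's nested stateful while-loops by one stateless filtered comprehension over
-- all digit lengths with closed-form bounds max(n,10^(d-1)) (objective: simpler).
-- Pre_ excludes the inputs on which A's number_of_digits loops forever (negative n with n < stop).


-- ===== PORT A =====
-- Python's 10**e for a nonnegative int exponent (every use here has 0 ≤ e; exact there)
def pow10 (e : Int) : Int := 10 ^ e.toNat

-- the while-loop of number_of_digits; fuel 40 is ample for every |n| ≤ 2^31 admitted by
-- Dom (the loop stops before e = 40 there whenever 0 ≤ n; for n < 0 Python diverges and
-- Pre_ excludes those inputs)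
def nodGo (n : Int) (e : Int) : Nat → Int
  | 0 => e
  | fuel+1 => if PySem.Int.mod n (pow10 e) ≠ n then nodGo n (e+1) fuel else e

def number_of_digits (n : Int) : Int := nodGo n 1 40

-- the inner `while e <= stop_e` loop of A; returns (n, e, ranges); at most 6 iterations on Dom
def crInner (stop_e stop : Int) : Nat → Int → Int → List (Int × Int) → Int × Int × List (Int × Int)
  | 0, e, n, ranges => (n, e, ranges)
  | fuel+1, e, n, ranges =>
    if e ≤ stop_e then
      let ranges := ranges ++ [if e = stop_e then (n, stop + 1) else (n, min stop (pow10 e))]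
      let e := e + 1
      let n := pow10 e
      let e := e + 1
      crInner stop_e stop fuel e n ranges
    else (n, e, ranges)

-- the outer `while n < stop` loop of A; it runs at most twice on Dom, fuel 40 is ample
def crOuter (stop : Int) : Nat → Int → List (Int × Int) → List (Int × Int)
  | 0, _, ranges => ranges
  | fuel+1, n, ranges =>
    if n < stop then
      let e := number_of_digits n
      let p := if PySem.Int.mod e 2 ≠ 0 then (pow10 e, e + 1) else (n, e)
      if p.1 > stop then crOuter stop fuel p.1 ranges
      else
        let stop_e := number_of_digits stop
        let r := crInner stop_e stop 40 p.2 p.1 ranges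
        crOuter stop fuel r.1 r.2.2
    else ranges

def considerable_ranges (in_range : Int × Int) : List (Int × Int) :=
  crOuter in_range.2 40 in_range.1 []

-- ===== PORT B =====
-- B's recursive digit count: n // 10 recursion (Python's `10` guard; floor division)
def num_digits (n : Int) : Int :=
  if n < 10 then 1 else 1 + num_digits (PySem.Int.floordiv n 10)
termination_by n.toNat
decreasing_by
  rw [PySem.Int.floordiv_eq_ediv_of_pos (by norm_num)]
  omega

def considerable_ranges_alt (in_range : Int × Int) : List (Int × Int) :=
  let n := in_range.1
  let stop := in_range.2
  if n ≥ stop then [] else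
  let stop_d := num_digits stop
  ((PySem.List.pyRange (num_digits n) (stop_d + 1) 1).filter
      (fun d => PySem.Int.mod d 2 == 0)).map
    (fun d => (max n (pow10 (d - 1)), if d = stop_d then stop + 1 else pow10 d))

-- ===== PRECONDITION & SPEC =====
-- Pre_ excludes exactly the inputs on which A diverges: n < 0 with n < stop makes
-- number_of_digits(n) an infinite loop (n % 10**e is nonnegative, never equal to n).
def Pre_considerable_ranges (in_range : Int × Int) : Prop :=
  0 ≤ in_range.1 ∨ in_range.2 ≤ in_range.1
instance (in_range : Int × Int) : Decidable (Pre_considerable_ranges in_range) := by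
  unfold Pre_considerable_ranges; infer_instance

def pvWitness_considerable_ranges : (Int × Int) := (123, 100005)

def Spec_considerable_ranges (in_range : Int × Int) (out : List (Int × Int)) : Prop := out = considerable_ranges_alt in_range
instance (in_range : Int × Int) (out : List (Int × Int)) : Decidable (Spec_considerable_ranges in_range out) := by unfold Spec_considerable_ranges; infer_instance

-- ===== CLAIM (what is proved, stated in full; the proofs are below) =====
def Claim_equal_considerable_ranges : Prop := ∀ (in_range : Int × Int), Dom_considerable_ranges in_range → Pre_considerable_ranges in_range → Spec_considerable_ranges in_range (considerable_ranges in_range)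

-- ===== LEMMAS AND PROOFS =====

theorem pow10_pos (e : Int) : 0 < pow10 e := by
  unfold pow10; positivity

theorem pow10_mono {e f : Int} (h : e ≤ f) : pow10 e ≤ pow10 f := by
  unfold pow10
  exact pow_le_pow_right₀ (by norm_num) (Int.toNat_le_toNat h)

theorem pow10_succ {e : Int} (h : 0 ≤ e) : pow10 (e + 1) = 10 * pow10 e := by
  unfold pow10
  rw [show (e + 1).toNat = e.toNat + 1 by omega, pow_succ]
  ring

theorem mod_self_iff {n m : Int} (hn : 0 ≤ n) (hm : 0 < m) :
    PySem.Int.mod n m = n ↔ n < m := by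
  rw [PySem.Int.mod_eq_emod_of_pos hm]
  constructor
  · intro h; rw [← h]; exact Int.emod_lt_of_pos n hm
  · intro h; exact Int.emod_eq_of_lt hn h

theorem nodGo_spec {n : Int} (hn : 0 ≤ n) :
    ∀ (fuel : Nat) (e : Int), 1 ≤ e → n < pow10 (e + fuel) →
      e ≤ nodGo n e fuel ∧ n < pow10 (nodGo n e fuel) ∧
        ∀ k, e ≤ k → n < pow10 k → nodGo n e fuel ≤ k := by
  intro fuel
  induction fuel with
  | zero =>
    intro e he hb
    simp only [Nat.cast_zero, add_zero] at hb
    exact ⟨le_refl _, hb, fun k hk _ => by simpa [nodGo] using hk⟩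
  | succ f ih =>
    intro e he hb
    by_cases hlt : n < pow10 e
    · have hmod : PySem.Int.mod n (pow10 e) = n := (mod_self_iff hn (pow10_pos e)).2 hlt
      simp only [nodGo, hmod, ne_eq, not_true_eq_false, if_false]
      exact ⟨le_refl _, hlt, fun k hk _ => hk⟩
    · have hmod : PySem.Int.mod n (pow10 e) ≠ n := by
        intro h; exact hlt ((mod_self_iff hn (pow10_pos e)).1 h)
      simp only [nodGo, hmod, ne_eq, not_false_eq_true, if_true]
      have hb' : n < pow10 (e + 1 + f) := by
        have : e + 1 + (f : Int) = e + ((f : Nat) + 1 : Nat) := by push_cast; ring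
        rw [this]; exact hb
      obtain ⟨h1, h2, h3⟩ := ih (e + 1) (by omega) hb'
      refine ⟨by omega, h2, fun k hk hkb => ?_⟩
      have : e + 1 ≤ k := by
        rcases lt_or_ge e k with h | h
        · omega
        · exfalso; exact hlt (lt_of_lt_of_le hkb (pow10_mono (by omega)))
      exact h3 k this hkb

-- number_of_digits facts for 0 ≤ n ≤ 2^31
theorem nod_spec {n : Int} (hn : 0 ≤ n) (hb : n ≤ 2147483648) :
    1 ≤ number_of_digits n ∧ n < pow10 (number_of_digits n) ∧
      number_of_digits n ≤ 10 ∧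
      ∀ k, 1 ≤ k → n < pow10 k → number_of_digits n ≤ k := by
  have h41 : (2147483648 : Int) < pow10 41 := by unfold pow10; decide
  have h10 : (2147483648 : Int) < pow10 10 := by unfold pow10; decide
  have hbig : n < pow10 (1 + (40 : Nat)) := by
    have : ((1 : Int) + (40 : Nat)) = 41 := by norm_num
    rw [this]; omega
  obtain ⟨h1, h2, h3⟩ := nodGo_spec hn 40 1 le_rfl hbig
  exact ⟨h1, h2, h3 10 (by norm_num) (by omega), h3⟩

-- B's num_digits produces the bracketing 10^(d-1) ≤ n < 10^d for 0 ≤ n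
theorem num_digits_spec (n : Int) (hn : 0 ≤ n) :
    1 ≤ num_digits n ∧ n < pow10 (num_digits n) ∧
      (num_digits n = 1 ∨ pow10 (num_digits n - 1) ≤ n) := by
  induction n using num_digits.induct with
  | case1 n h =>
    rw [num_digits, if_pos h]
    exact ⟨le_rfl, by unfold pow10; simp; omega, Or.inl rfl⟩
  | case2 n h ih =>
    rw [num_digits, if_neg h]
    rw [PySem.Int.floordiv_eq_ediv_of_pos (by norm_num)] at ih ⊢
    obtain ⟨ih1, ih2, ih3⟩ := ih (by omega)
    refine ⟨by omega, ?_, ?_⟩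
    · rw [show 1 + num_digits (n / 10) = num_digits (n / 10) + 1 by ring,
          pow10_succ (by omega)]
      omega
    · right
      rw [show 1 + num_digits (n / 10) - 1 = num_digits (n / 10) by ring]
      rcases ih3 with h1 | h1
      · rw [h1]
        have : pow10 1 = 10 := by unfold pow10; decide
        omega
      · calc pow10 (num_digits (n / 10))
            = 10 * pow10 (num_digits (n / 10) - 1) := by
              rw [← pow10_succ (by omega)]; ring_nf
          _ ≤ 10 * (n / 10) := by omega
          _ ≤ n := by omega

-- on Dom the two digit-count functions agree
theorem nod_eq_num {n : Int} (hn : 0 ≤ n) (hb : n ≤ 2147483648) :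
    number_of_digits n = num_digits n := by
  obtain ⟨h1, h2, _, hmin⟩ := nod_spec hn hb
  obtain ⟨g1, g2, g3⟩ := num_digits_spec n hn
  have hle : number_of_digits n ≤ num_digits n := hmin _ g1 g2
  rcases g3 with h | h
  · omega
  · by_contra hcon
    have : number_of_digits n ≤ num_digits n - 1 := by omega
    have := pow10_mono this
    omega

-- step-2 range induction forms
theorem pyRange_two_nil {a b : Int} (h : b ≤ a) : PySem.List.pyRange a b 2 = [] := by
  rw [PySem.List.pyRange_of_pos a b (by norm_num)]
  simp [show ¬ a < b by omega]

theorem pyRange_two_cons {a b : Int} (h : a < b) :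
    PySem.List.pyRange a b 2 = a :: PySem.List.pyRange (a + 2) b 2 := by
  rw [PySem.List.pyRange_of_pos a b (by norm_num), PySem.List.pyRange_of_pos (a+2) b (by norm_num)]
  simp only [if_pos h]
  have hc : ((b - a + 2 - 1) / 2).toNat =
      (if a + 2 < b then ((b - (a + 2) + 2 - 1) / 2).toNat else 0) + 1 := by
    split_ifs <;> omega
  rw [hc, List.range_succ_eq_map]
  simp only [List.map_cons, List.map_map]
  congr 1
  · push_cast; ring
  · apply List.map_congr_left
    intro k _
    simp only [Function.comp_apply]
    push_cast; ring

-- the even elements of range(a, b) are exactly range(evenUp a, b, 2)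
def evenUp (a : Int) : Int := if PySem.Int.mod a 2 == 0 then a else a + 1

theorem evenUp_ge (a : Int) : a ≤ evenUp a := by
  unfold evenUp; split_ifs <;> omega

theorem filter_even_range :
    ∀ (k : Nat) (a b : Int), b ≤ a + k →
      (PySem.List.pyRange a b 1).filter (fun d => PySem.Int.mod d 2 == 0) =
        PySem.List.pyRange (evenUp a) b 2 := by
  intro k
  induction k with
  | zero =>
    intro a b h
    simp only [Nat.cast_zero, add_zero] at h
    rw [PySem.List.pyRange_one_eq_nil h, pyRange_two_nil (le_trans h (evenUp_ge a))]
    rfl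
  | succ f ih =>
    intro a b h
    by_cases hab : a < b
    · rw [PySem.List.pyRange_one_cons hab, List.filter_cons]
      have hmod : PySem.Int.mod a 2 = a % 2 := PySem.Int.mod_eq_emod_of_pos (by norm_num)
      by_cases hev : a % 2 = 0
      · have hcond : (PySem.Int.mod a 2 == 0) = true := by rw [hmod, hev]; rfl
        rw [if_pos hcond, ih (a+1) b (by push_cast at h ⊢; omega)]
        have hu : evenUp a = a := by unfold evenUp; rw [hcond]; rfl
        have hu1 : evenUp (a+1) = a + 2 := by
          unfold evenUp
          have : PySem.Int.mod (a+1) 2 = (a+1) % 2 := PySem.Int.mod_eq_emod_of_pos (by norm_num)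
          rw [this, show (a+1) % 2 = 1 by omega]
          split_ifs with hh
          · exact absurd hh (by decide)
          · omega
        rw [hu, hu1, pyRange_two_cons hab]
      · have hcond : ¬ ((PySem.Int.mod a 2 == 0) = true) := by
          rw [hmod]; simp; omega
        rw [if_neg hcond, ih (a+1) b (by push_cast at h ⊢; omega)]
        have hu : evenUp a = a + 1 := by
          unfold evenUp; rw [if_neg hcond]
        have hu1 : evenUp (a+1) = a + 1 := by
          unfold evenUp
          have : PySem.Int.mod (a+1) 2 = (a+1) % 2 := PySem.Int.mod_eq_emod_of_pos (by norm_num)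
          rw [this, show (a+1) % 2 = 0 by omega]
          rfl
        rw [hu, hu1]
    · rw [PySem.List.pyRange_one_eq_nil (by omega),
          pyRange_two_nil (le_trans (by omega) (evenUp_ge a))]
      rfl

-- the inner loop never runs when e > stop_e, for any fuel
theorem crInner_stop {stop_e stop e n : Int} {acc : List (Int × Int)}
    (h : ¬ e ≤ stop_e) : ∀ fuel, crInner stop_e stop fuel e n acc = (n, e, acc) := by
  intro fuel
  cases fuel with
  | zero => rfl
  | succ f => simp [crInner, h]

-- the outer loop exits at once when n ≥ stop, for any fuel
theorem crOuter_exit {stop n : Int} {acc : List (Int × Int)}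
    (h : ¬ n < stop) : ∀ fuel, crOuter stop fuel n acc = acc := by
  intro fuel
  cases fuel with
  | zero => rfl
  | succ f => simp [crOuter, h]

-- the ranges the inner loop builds = B's closed-form map over the even digit lengths
theorem inner_map (stop_e stop n0 : Int) (hstop : pow10 (stop_e - 1) ≤ stop) :
    ∀ (fuel : Nat) (e lo : Int) (acc : List (Int × Int)),
      stop_e < e + 2 * (fuel : Int) → 0 ≤ e →
      lo = max n0 (pow10 (e - 1)) → n0 < pow10 e →
      (crInner stop_e stop fuel e lo acc).2.2 =
        acc ++ (PySem.List.pyRange e (stop_e + 1) 2).map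
          (fun d => (max n0 (pow10 (d - 1)), if d = stop_e then stop + 1 else pow10 d)) := by
  intro fuel
  induction fuel with
  | zero =>
    intro e lo acc hf he0 hlo hn0
    simp only [Nat.cast_zero, mul_zero, add_zero] at hf
    rw [pyRange_two_nil (by omega)]
    simp [crInner]
  | succ f ih =>
    intro e lo acc hf he0 hlo hn0
    by_cases he : e ≤ stop_e
    · simp only [crInner, if_pos he]
      rw [show e + 1 + 1 = e + 2 from by ring]
      rw [pyRange_two_cons (by omega : e < stop_e + 1), List.map_cons]
      have helem : (if e = stop_e then (lo, stop + 1) else (lo, min stop (pow10 e)))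
          = (max n0 (pow10 (e - 1)), if e = stop_e then stop + 1 else pow10 e) := by
        split_ifs with hes
        · rw [hlo]
        · have : pow10 e ≤ stop :=
            le_trans (pow10_mono (by omega)) hstop
          rw [hlo, min_eq_right this]
      have hstep := ih (e + 2) (pow10 (e + 1)) (acc ++ [if e = stop_e then (lo, stop + 1) else (lo, min stop (pow10 e))])
        (by push_cast at hf ⊢; omega) (by omega)
        (by
          have h1 : n0 ≤ pow10 (e + 1) := le_trans (le_of_lt hn0) (pow10_mono (by omega))
          rw [show e + 2 - 1 = e + 1 by ring]
          omega)
        (lt_of_lt_of_le hn0 (pow10_mono (by omega)))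
      rw [hstep, helem]
      simp
    · rw [crInner_stop he, pyRange_two_nil (by omega)]
      simp

-- after the inner loop ran, n exceeds stop (so the outer loop exits)
theorem inner_exit {stop_e stop : Int} (hst : stop < pow10 stop_e) :
    ∀ (fuel : Nat) (e n : Int) (acc : List (Int × Int)),
      e ≤ stop_e → stop_e < e + 2 * (fuel : Int) →
      stop < (crInner stop_e stop fuel e n acc).1 := by
  intro fuel
  induction fuel with
  | zero =>
    intro e n acc he h
    simp only [Nat.cast_zero, mul_zero, add_zero] at h; omega
  | succ f ih =>
    intro e n acc he h
    simp only [crInner, if_pos he]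
    rw [show e + 1 + 1 = e + 2 from by ring]
    by_cases h2 : e + 2 ≤ stop_e
    · exact ih (e + 2) _ _ h2 (by push_cast at h ⊢; omega)
    · rw [crInner_stop h2]
      exact lt_of_lt_of_le hst (pow10_mono (by omega))

-- unfolding one outer-loop iteration with a positive guard
theorem crOuter_step (stop : Int) (fuel : Nat) (n : Int) (acc : List (Int × Int))
    (h : n < stop) :
    crOuter stop (fuel + 1) n acc =
      (if (if PySem.Int.mod (number_of_digits n) 2 ≠ 0
            then (pow10 (number_of_digits n), number_of_digits n + 1)
            else (n, number_of_digits n)).1 > stop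
       then crOuter stop fuel
              (if PySem.Int.mod (number_of_digits n) 2 ≠ 0
                then (pow10 (number_of_digits n), number_of_digits n + 1)
                else (n, number_of_digits n)).1 acc
       else
         crOuter stop fuel
           (crInner (number_of_digits stop) stop 40
             (if PySem.Int.mod (number_of_digits n) 2 ≠ 0
               then (pow10 (number_of_digits n), number_of_digits n + 1)
               else (n, number_of_digits n)).2
             (if PySem.Int.mod (number_of_digits n) 2 ≠ 0
               then (pow10 (number_of_digits n), number_of_digits n + 1)
               else (n, number_of_digits n)).1 acc).1
           (crInner (number_of_digits stop) stop 40
             (if PySem.Int.mod (number_of_digits n) 2 ≠ 0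
               then (pow10 (number_of_digits n), number_of_digits n + 1)
               else (n, number_of_digits n)).2
             (if PySem.Int.mod (number_of_digits n) 2 ≠ 0
               then (pow10 (number_of_digits n), number_of_digits n + 1)
               else (n, number_of_digits n)).1 acc).2.2) := by
  simp only [crOuter, if_pos h]

-- ===== VERDICT (by name: the statement is the Claim_ definition above) =====
theorem considerable_ranges_spec : Claim_equal_considerable_ranges := by
  intro in_range hdom hpre
  obtain ⟨n, stop⟩ := in_range
  unfold Spec_considerable_ranges considerable_ranges considerable_ranges_alt
  simp only []
  by_cases hlt : n < stop
  · -- Pre_ forces 0 ≤ n here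
    have hn : 0 ≤ n := by
      rcases hpre with h | h
      · exact h
      · exact absurd hlt (by omega)
    have hdn : n ≤ 2147483648 ∧ stop ≤ 2147483648 := by
      simp only [Dom_considerable_ranges, pvDomInt, Bool.and_eq_true, decide_eq_true_eq] at hdom
      omega
    obtain ⟨he1, hne, he10, hmin⟩ := nod_spec hn hdn.1
    obtain ⟨hs1, hse, hs10, hsmin⟩ := nod_spec (by omega : (0:Int) ≤ stop) hdn.2
    rw [show (40 : Nat) = 39 + 1 from rfl, crOuter_step stop 39 n [] hlt,
        if_neg (show ¬ n ≥ stop by omega)]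
    set e1 := number_of_digits n with he1def
    set se := number_of_digits stop with hsedef
    set p := if PySem.Int.mod e1 2 ≠ 0 then (pow10 e1, e1 + 1) else (n, e1) with hp
    have hm2 : PySem.Int.mod e1 2 = e1 % 2 := PySem.Int.mod_eq_emod_of_pos (by norm_num)
    -- the even digit lengths B enumerates start exactly at A's adjusted exponent p.2
    have hnum_n : num_digits n = e1 := (nod_eq_num hn hdn.1).symm
    have hnum_s : num_digits stop = se := (nod_eq_num (by omega) hdn.2).symm
    have hfilter : (PySem.List.pyRange (num_digits n) (num_digits stop + 1) 1).filter
        (fun d => PySem.Int.mod d 2 == 0) = PySem.List.pyRange p.2 (se + 1) 2 := by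
      rw [hnum_n, hnum_s, filter_even_range 20 e1 (se + 1) (by push_cast; omega)]
      congr 1
      unfold evenUp
      rw [hp, hm2]
      by_cases hev : e1 % 2 = 0
      · simp [hev]
      · simp [hev]
    -- the adjusted pair p satisfies p.1 = max n 10^(p.2-1), and n < 10^p.2
    have hplow : p.1 = max n (pow10 (p.2 - 1)) ∧ n < pow10 p.2 ∧ 1 ≤ p.2 := by
      rw [hp]
      split_ifs with hodd
      · refine ⟨?_, lt_of_lt_of_le hne (pow10_mono (by omega)), by omega⟩
        simp only [show e1 + 1 - 1 = e1 by ring]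
        omega
      · rw [hm2] at hodd
        have he2 : 2 ≤ e1 := by omega
        have hlow : pow10 (e1 - 1) ≤ n := by
          by_contra hcon
          push Not at hcon
          have := hmin (e1 - 1) (by omega) hcon
          omega
        exact ⟨by simp only []; omega, hne, by omega⟩
    have hstoplow : pow10 (se - 1) ≤ stop := by
      by_cases h1 : se = 1
      · rw [h1]
        have : pow10 ((1:Int) - 1) = 1 := by unfold pow10; decide
        omega
      · by_contra hcon
        push Not at hcon
        have := hsmin (se - 1) (by omega) hcon
        omega
    by_cases hgt : p.1 > stop
    · rw [if_pos hgt, crOuter_exit (by omega) 39]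
      -- B's range is empty: stop < p.1 = 10^(p.2-1) forces se + 1 ≤ p.2
      have hse_lt : se + 1 ≤ p.2 := by
        have hlt2 : stop < pow10 (p.2 - 1) := by
          have := hplow.1; omega
        have := hsmin (p.2 - 1) ?_ hlt2
        · omega
        · -- p.2 - 1 ≥ 1: if p.2 = 1 then pow10 0 = 1 > stop, impossible since stop ≥ 1
          by_contra hcon
          have hp21 : p.2 = 1 := by have := hplow.2.2; omega
          rw [hp21] at hlt2
          have : pow10 ((1:Int) - 1) = 1 := by unfold pow10; decide
          omega
      rw [hfilter, pyRange_two_nil (by omega)]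
      rfl
    · rw [if_neg hgt]
      have hfuel : se < p.2 + 2 * ((40 : Nat) : Int) := by push_cast; omega
      have hexit := inner_exit hse 40 p.2 p.1 [] (by
        by_contra hcon
        push Not at hcon
        have h1 : pow10 se ≤ pow10 (p.2 - 1) := pow10_mono (by omega)
        have h2 : pow10 (p.2 - 1) ≤ max n (pow10 (p.2 - 1)) := le_max_right _ _
        have := hplow.1
        omega) hfuel
      rw [crOuter_exit (by omega) 39]
      rw [hfilter, hnum_s]
      exact inner_map se stop n hstoplow 40 p.2 p.1 [] hfuel (by omega) hplow.1 hplow.2.1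
  · -- n ≥ stop: both return [] immediately
    rw [crOuter_exit hlt 40, if_pos (show n ≥ stop by omega)]
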